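-- pv_equiv track=rewrite | github.com/thatguyovathea/biz-prospector | src/scheduler.py | _strip_biz_entries
-- ===== SOURCE A (Python) =====
-- MARKER = "# biz-prospector:"
--
-- def _strip_biz_entries(crontab: str) -> tuple[list[str], int]:
--     """Remove all biz-prospector entries from crontab lines.
--
--     Returns cleaned lines and count of removed entries.
--     """
--     lines = crontab.splitlines()
--     cleaned = []
--     skip_next = False
--     removed = 0
--     for line in lines:
--         if line.startswith(MARKER):
--             skip_next = True
--             removed += 1
--             continue
--         if skip_next:
--             skip_next = False
--             continue
--         cleaned.append(line)
--     return cleaned, removed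
-- ===== SOURCE B (Python) =====
-- MARKER = "# biz-prospector:"
--
-- def _strip_biz_entries(crontab: str) -> tuple[list[str], int]:
--     """Remove all biz-prospector entries from crontab lines.
--
--     Returns cleaned lines and count of removed entries.
--     """
--     lines = crontab.splitlines()
--     flags = [line.startswith(MARKER) for line in lines]
--     cleaned = [line for line, f, pf in zip(lines, flags, [False] + flags)
--                if not f and not pf]
--     return cleaned, sum(flags)
-- ===== Notes on version B (the rewrite author's own statement) =====
-- stated objective: alternative
-- what changed: Replaces the stateful loop with its skip_next flag by a two-pass dataflow formulation: precompute a marker-flag list, filter the lines zipped with their own and their predecessor's flag (flags shifted by one), and get the removed count as sum(flags).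
import Mathlib
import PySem

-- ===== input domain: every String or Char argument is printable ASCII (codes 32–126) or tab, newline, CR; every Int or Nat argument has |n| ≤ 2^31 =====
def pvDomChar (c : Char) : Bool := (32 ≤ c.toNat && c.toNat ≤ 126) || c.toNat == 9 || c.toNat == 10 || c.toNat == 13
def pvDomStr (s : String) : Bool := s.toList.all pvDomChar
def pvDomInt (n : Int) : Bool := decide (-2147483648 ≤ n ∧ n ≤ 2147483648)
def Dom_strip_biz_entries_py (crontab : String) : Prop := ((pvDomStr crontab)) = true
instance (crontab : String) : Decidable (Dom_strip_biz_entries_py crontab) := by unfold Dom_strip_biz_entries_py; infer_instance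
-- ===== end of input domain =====

-- B is an alternative, flag-list/zip formulation of A's stateful loop; return values are proved equal on all inputs.

-- ===== PORT A =====
def pvMARKER : String := "# biz-prospector:"

-- A's for-loop over the lines with state (cleaned, skip_next, removed)
def pvLoopA (lines : List String) (cleaned : List String) (skipNext : Bool) (removed : Int) : List String × Int :=
  match lines with
  | [] => (cleaned, removed)
  | l :: ls =>
    if PySem.Str.startswith l pvMARKER then pvLoopA ls cleaned true (removed + 1)
    else if skipNext then pvLoopA ls cleaned false removed
    else pvLoopA ls (cleaned ++ [l]) skipNext removed

def strip_biz_entries_py (crontab : String) : List String × Int :=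
  pvLoopA (PySem.Str.splitlines crontab) [] false 0

-- ===== PORT B =====
def strip_biz_entries_py_alt (crontab : String) : List String × Int :=
  let lines := PySem.Str.splitlines crontab
  let flags := lines.map (fun l => PySem.Str.startswith l pvMARKER)
  -- zip(lines, flags, [False] + flags); zip truncates to the shortest
  let cleaned := (((lines.zip flags).zip (false :: flags)).filter
      (fun p => !p.1.2 && !p.2)).map (fun p => p.1.1)
  (cleaned, flags.foldl (fun a f => a + (if f then (1 : Int) else 0)) 0)

-- ===== PRECONDITION & SPEC =====
def Spec_strip_biz_entries_py (crontab : String) (out : List String × Int) : Prop := out = strip_biz_entries_py_alt crontab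
instance (crontab : String) (out : List String × Int) : Decidable (Spec_strip_biz_entries_py crontab out) := by unfold Spec_strip_biz_entries_py; infer_instance

-- ===== CLAIM (what is proved, stated in full; the proofs are below) =====
def Claim_equal_strip_biz_entries_py : Prop := ∀ (crontab : String), Dom_strip_biz_entries_py crontab → Spec_strip_biz_entries_py crontab (strip_biz_entries_py crontab)

-- ===== LEMMAS AND PROOFS =====

-- common characterisation: the kept lines given the previous line's marker flag
def pvKeep (ls : List String) (pf : Bool) : List String :=
  match ls with
  | [] => []
  | l :: ls =>
    (if !(PySem.Str.startswith l pvMARKER) && !pf then [l] else []) ++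
      pvKeep ls (PySem.Str.startswith l pvMARKER)

lemma pvLoopA_eq (ls : List String) : ∀ (acc : List String) (sk : Bool) (rem : Int),
    pvLoopA ls acc sk rem = (acc ++ pvKeep ls sk, rem + ((ls.countP (fun l => PySem.Chars.startswith l.toList pvMARKER.toList) : Nat) : Int)) := by
  induction ls with
  | nil => intro acc sk rem; simp [pvLoopA, pvKeep]
  | cons l ls ih =>
    intro acc sk rem
    by_cases h : PySem.Chars.startswith l.toList pvMARKER.toList = true
    · simp [pvLoopA, pvKeep, h, ih]
      omega
    · simp at h
      cases sk <;> simp [pvLoopA, pvKeep, h, ih]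

lemma pvFilterB_eq (ls : List String) : ∀ (pf : Bool),
    ((((ls.zip (ls.map (fun l => PySem.Chars.startswith l.toList pvMARKER.toList))).zip
        (pf :: ls.map (fun l => PySem.Chars.startswith l.toList pvMARKER.toList))).filter
        (fun p => !p.1.2 && !p.2)).map (fun p => p.1.1)) = pvKeep ls pf := by
  induction ls with
  | nil => intro pf; simp [pvKeep]
  | cons l ls ih =>
    intro pf
    by_cases h : PySem.Chars.startswith l.toList pvMARKER.toList = true
    · simp [pvKeep, h, ih]
    · simp at h
      cases pf <;> simp [pvKeep, h, ih]

lemma pvCount_eq (ls : List String) : ∀ (a : Int),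
    (ls.map (fun l => PySem.Chars.startswith l.toList pvMARKER.toList)).foldl (fun a f => a + (if f then (1 : Int) else 0)) a
      = a + ((ls.countP (fun l => PySem.Chars.startswith l.toList pvMARKER.toList) : Nat) : Int) := by
  induction ls with
  | nil => intro a; simp
  | cons l ls ih =>
    intro a
    by_cases h : PySem.Chars.startswith l.toList pvMARKER.toList = true <;>
      simp [h, ih] <;> omega

-- ===== VERDICT (by name: the statement is the Claim_ definition above) =====
theorem strip_biz_entries_py_spec : Claim_equal_strip_biz_entries_py := by
  intro crontab _
  unfold Spec_strip_biz_entries_py strip_biz_entries_py strip_biz_entries_py_alt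
  simp [pvLoopA_eq, pvFilterB_eq, pvCount_eq]
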